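-- pv_equiv track=rewrite | github.com/erictao04/Reasoning-Motifs | motif_mining/v3/analysis/sequential_patterns.py | enumerate_subsequences
-- ===== SOURCE A (Python) =====
-- from itertools import combinations
--
-- Pattern = tuple[str, ...]
--
-- def enumerate_subsequences(
--     tokens: list[str],
--     min_len: int,
--     max_len: int,
-- ) -> set[Pattern]:
--     """Enumerate unique subsequences (with arbitrary gaps) up to max_len."""
--     n = len(tokens)
--     out: set[Pattern] = set()
--     if n == 0:
--         return out
--
--     upper = min(max_len, n)
--     for k in range(max(1, min_len), upper + 1):
--         for idxs in combinations(range(n), k):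
--             out.add(tuple(tokens[i] for i in idxs))
--     return out
-- ===== SOURCE B (Python) =====
-- def enumerate_subsequences(
--     tokens: list[str],
--     min_len: int,
--     max_len: int,
-- ) -> set:
--     """Enumerate unique subsequences (with arbitrary gaps) up to max_len."""
--
--     def grow(rest, k):
--         # all length-k subsequences of rest, in positional lexicographic order
--         if k == 0:
--             return [()]
--         return [(rest[i],) + t
--                 for i in range(len(rest) - k + 1)
--                 for t in grow(rest[i + 1:], k - 1)]
--
--     n = len(tokens)
--     out = set()
--     for k in range(max(1, min_len), min(max_len, n) + 1):
--         out.update(grow(tokens, k))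
--     return out
-- ===== Notes on version B (the rewrite author's own statement) =====
-- stated objective: alternative
-- what changed: Replaces the per-length itertools.combinations enumeration of index tuples with a recursive positional DFS that builds each length-k subsequence of token values directly, choosing the first kept token and recursing on the remaining suffix.
import Mathlib
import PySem

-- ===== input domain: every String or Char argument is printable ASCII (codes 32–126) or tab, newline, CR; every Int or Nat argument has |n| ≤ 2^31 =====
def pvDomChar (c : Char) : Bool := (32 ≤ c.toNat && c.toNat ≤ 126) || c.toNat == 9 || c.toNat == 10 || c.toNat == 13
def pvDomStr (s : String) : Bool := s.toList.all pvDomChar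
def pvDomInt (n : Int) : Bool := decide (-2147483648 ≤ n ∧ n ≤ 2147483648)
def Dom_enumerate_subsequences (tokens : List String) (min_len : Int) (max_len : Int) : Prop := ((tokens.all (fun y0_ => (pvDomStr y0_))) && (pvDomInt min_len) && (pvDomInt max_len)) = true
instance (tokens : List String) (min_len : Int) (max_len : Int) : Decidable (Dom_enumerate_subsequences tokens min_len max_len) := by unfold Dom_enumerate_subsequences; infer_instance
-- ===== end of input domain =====

-- B replaces A's per-length combinations-of-index-tuples enumeration with a recursive positional
-- DFS that builds subsequences of token values directly; alternative algorithm of similar cost.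

-- ===== PORT A =====
def enumerate_subsequences (tokens : List String) (min_len : Int) (max_len : Int) : List (List String) :=
  let n : Int := tokens.length
  if n = 0 then PySem.Set.empty else
  let upper := min max_len n
  (PySem.List.pyRange (max 1 min_len) (upper + 1) 1).foldl
    (fun out k =>
      (PySem.List.combinations (PySem.List.pyRange 0 n 1) k.toNat).foldl
        (fun out idxs => PySem.Set.add out (idxs.map (fun i => PySem.List.pyGetD tokens i "")))
        out)
    PySem.Set.empty

-- ===== PORT B =====
-- helper grow(rest, k) of Source B (k, a value of the range starting at max(1, min_len), is a Nat)
def pvGrow (rest : List String) (k : Nat) : List (List String) :=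
  match k with
  | 0 => [[]]
  | k + 1 =>
    (PySem.List.pyRange 0 ((rest.length : Int) - (k + 1) + 1) 1).flatMap
      (fun i => (pvGrow (PySem.List.slice rest (some (i + 1)) none) k).map
        (fun t => PySem.List.pyGetD rest i "" :: t))

def enumerate_subsequences_alt (tokens : List String) (min_len : Int) (max_len : Int) : List (List String) :=
  let n : Int := tokens.length
  (PySem.List.pyRange (max 1 min_len) (min max_len n + 1) 1).foldl
    (fun out k => PySem.Set.update out (pvGrow tokens k.toNat))
    PySem.Set.empty

-- ===== PRECONDITION & SPEC =====
def Spec_enumerate_subsequences (tokens : List String) (min_len : Int) (max_len : Int) (out : List (List String)) : Prop := out = enumerate_subsequences_alt tokens min_len max_len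
instance (tokens : List String) (min_len : Int) (max_len : Int) (out : List (List String)) : Decidable (Spec_enumerate_subsequences tokens min_len max_len out) := by unfold Spec_enumerate_subsequences; infer_instance

-- ===== CLAIM (what is proved, stated in full; the proofs are below) =====
def Claim_equal_enumerate_subsequences : Prop := ∀ (tokens : List String) (min_len : Int) (max_len : Int), Dom_enumerate_subsequences tokens min_len max_len → Spec_enumerate_subsequences tokens min_len max_len (enumerate_subsequences tokens min_len max_len)

-- ===== LEMMAS AND PROOFS =====

-- pvGrow's successor step in pure Nat-range form
lemma pvGrow_succ (xs : List String) (k : Nat) :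
    pvGrow xs (k + 1) =
      (List.range (xs.length + 1 - (k + 1))).flatMap
        (fun i => (pvGrow (xs.drop (i + 1)) k).map (fun t => xs.getD i "" :: t)) := by
  rw [pvGrow, PySem.List.pyRange_one, List.flatMap_map]
  have hb : (((xs.length : Int) - (k + 1) + 1) - 0).toNat = xs.length + 1 - (k + 1) := by omega
  rw [hb]
  apply List.flatMap_congr
  intro j hj
  have h1 : (0 : Int) + j + 1 = ((j + 1 : Nat) : Int) := by omega
  rw [h1, PySem.List.slice_from_natCast]
  have h2 : (0 : Int) + j = ((j : Nat) : Int) := by omega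
  rw [h2, PySem.List.pyGetD_natCast]

-- B's DFS produces exactly the length-k combinations, in the same order
lemma pvGrow_eq_combinations (k : Nat) (xs : List String) :
    pvGrow xs k = PySem.List.combinations xs k := by
  induction k generalizing xs with
  | zero => simp [pvGrow, PySem.List.combinations_zero]
  | succ k ihk =>
    induction xs with
    | nil =>
      rw [pvGrow_succ, PySem.List.combinations_nil_succ]
      simp
    | cons x xs ihxs =>
      rw [pvGrow_succ, PySem.List.combinations_cons_succ]
      by_cases h : xs.length < k
      · have h1 : (x :: xs).length + 1 - (k + 1) = 0 := by simp; omega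
        rw [h1]
        rw [PySem.List.combinations_eq_nil_of_length_lt _ h,
          PySem.List.combinations_eq_nil_of_length_lt _ (by omega : xs.length < k + 1)]
        simp
      · have h1 : (x :: xs).length + 1 - (k + 1) = (xs.length + 1 - (k + 1)) + 1 := by
          simp; omega
        rw [h1, List.range_succ_eq_map, List.flatMap_cons, List.flatMap_map]
        congr 1
        · simp [ihk]
        · rw [← ihxs, pvGrow_succ]
          apply List.flatMap_congr
          intro j hj
          simp

-- ===== VERDICT (by name: the statement is the Claim_ definition above) =====
theorem enumerate_subsequences_spec : Claim_equal_enumerate_subsequences := by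
  intro tokens min_len max_len _
  unfold Spec_enumerate_subsequences enumerate_subsequences enumerate_subsequences_alt
  simp only []
  by_cases h : (tokens.length : Int) = 0
  · rw [if_pos h, h, PySem.List.pyRange_one_eq_nil (by omega)]
    rfl
  · rw [if_neg h]
    congr 1
    funext out k
    rw [← List.foldl_map, ← PySem.List.combinations_map,
      PySem.List.map_pyGetD_pyRange_zero', pvGrow_eq_combinations]
    rfl
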